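-- pv_equiv track=rewrite | github.com/caiziqing/DFFC-NET | DFFC-Net/Segmentation/Segmentation.py | zhebanchazhao
-- ===== SOURCE A (Python) =====
-- def zhebanchazhao(T, a, d):
--     l = len(T)
--     start = 0
--     end = l - 1
--     index = -1
--     while start <= end:
--
--         mid = (start + end) // 2
--         Tmid = T[mid]
--         if a <= Tmid and a >= (Tmid - d):
--             index = mid
--             break
--         elif Tmid < a:
--             start = mid + 1
--         else:
--             end = mid - 1
--
--     return index
-- ===== SOURCE B (Python) =====
-- def zhebanchazhao(T, a, d):
--     # Recursive binary search on list slices: probe the same midpoints as the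
--     # pointer-based loop, carrying an offset instead of start/end indices.
--     def go(sub, off):
--         if not sub:
--             return -1
--         m = (len(sub) - 1) // 2
--         x = sub[m]
--         if a <= x and a >= x - d:
--             return off + m
--         elif x < a:
--             return go(sub[m + 1:], off + m + 1)
--         else:
--             return go(sub[:m], off)
--     return go(T, 0)
-- ===== Notes on version B (the rewrite author's own statement) =====
-- stated objective: alternative
-- what changed: Replaced the iterative two-pointer while loop with a recursive binary search over list slices that carries an offset accumulator instead of start/end indices; it probes the same midpoints, so the returned index is identical.
import Mathlib
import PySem

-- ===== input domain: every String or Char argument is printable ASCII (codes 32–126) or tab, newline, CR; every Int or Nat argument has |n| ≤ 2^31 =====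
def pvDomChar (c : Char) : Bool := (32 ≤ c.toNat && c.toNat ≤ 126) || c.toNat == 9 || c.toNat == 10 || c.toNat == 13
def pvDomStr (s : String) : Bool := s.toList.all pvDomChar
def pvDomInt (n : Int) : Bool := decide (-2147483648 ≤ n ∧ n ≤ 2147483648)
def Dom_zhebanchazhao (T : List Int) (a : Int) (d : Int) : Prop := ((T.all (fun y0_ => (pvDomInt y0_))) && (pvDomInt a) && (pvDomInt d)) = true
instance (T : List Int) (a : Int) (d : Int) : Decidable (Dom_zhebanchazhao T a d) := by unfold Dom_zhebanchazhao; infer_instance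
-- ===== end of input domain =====

-- ===== PORT A =====
-- while loop of A as recursion on the shrinking interval, driven by a fuel
-- counter that only makes the same computation total (T.length + 1 fuel always
-- suffices: each iteration shrinks end - start).  T[mid] is always in range
-- when the loop body runs (0 <= start <= mid <= end <= len-1), so the pyGetD
-- default 0 is never read and the port is exact.
def zhGo (T : List Int) (a : Int) (d : Int) (fuel : Nat) (start : Int) (e : Int) : Int :=
  match fuel with
  | 0 => -1
  | fuel + 1 =>
    if start ≤ e then
      let mid := PySem.Int.floordiv (start + e) 2
      let Tmid := PySem.List.pyGetD T mid 0
      if a ≤ Tmid ∧ a ≥ Tmid - d then mid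
      else if Tmid < a then zhGo T a d fuel (mid + 1) e
      else zhGo T a d fuel start (mid - 1)
    else -1

def zhebanchazhao (T : List Int) (a : Int) (d : Int) : Int :=
  zhGo T a d (T.length + 1) 0 ((T.length : Int) - 1)

-- ===== PORT B =====
-- B: recursive binary search on list slices with an offset accumulator
-- (same fuel device; T.length + 1 always suffices since slices shrink).
def zhAltGo (a : Int) (d : Int) (fuel : Nat) (sub : List Int) (off : Int) : Int :=
  match fuel with
  | 0 => -1
  | fuel + 1 =>
    if sub.isEmpty then -1
    else
      let m := PySem.Int.floordiv ((sub.length : Int) - 1) 2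
      let x := PySem.List.pyGetD sub m 0
      if a ≤ x ∧ a ≥ x - d then off + m
      else if x < a then zhAltGo a d fuel (PySem.List.slice sub (some (m + 1))) (off + m + 1)
      else zhAltGo a d fuel (PySem.List.slice sub none (some m)) off

def zhebanchazhao_alt (T : List Int) (a : Int) (d : Int) : Int :=
  zhAltGo a d (T.length + 1) T 0

-- ===== PRECONDITION & SPEC =====
def Spec_zhebanchazhao (T : List Int) (a : Int) (d : Int) (out : Int) : Prop := out = zhebanchazhao_alt T a d
instance (T : List Int) (a : Int) (d : Int) (out : Int) : Decidable (Spec_zhebanchazhao T a d out) := by unfold Spec_zhebanchazhao; infer_instance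

-- ===== CLAIM (what is proved, stated in full; the proofs are below) =====
def Claim_equal_zhebanchazhao : Prop := ∀ (T : List Int) (a : Int) (d : Int), Dom_zhebanchazhao T a d → Spec_zhebanchazhao T a d (zhebanchazhao T a d)

-- ===== LEMMAS AND PROOFS =====

-- ===== VERDICT (by name: the statement is the Claim_ definition above) =====
lemma zh_loop_eq_slice (T : List Int) (a d : Int) :
    ∀ (fa fb : Nat) (start e : Int), 0 ≤ start → e < (T.length : Int) →
      (e + 1 - start).toNat < fa → (e + 1 - start).toNat < fb →
      zhGo T a d fa start e =
        zhAltGo a d fb ((T.drop start.toNat).take ((e + 1 - start).toNat)) start := by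
  intro fa
  induction fa with
  | zero => intro fb start e _ _ hfa _; omega
  | succ fa IH =>
  intro fb start e hs he hfa hfb
  cases fb with
  | zero => omega
  | succ fb =>
  simp only [zhGo, zhAltGo]
  by_cases hle : start ≤ e
  · have hmidb := PySem.Int.floordiv_two_mid_bounds hle
    have hmid2 : PySem.Int.floordiv (start + e) 2 = (start + e) / 2 :=
      PySem.Int.floordiv_eq_ediv_of_pos (by omega)
    have hlen : ((T.drop start.toNat).take ((e + 1 - start).toNat)).length =
        (e + 1 - start).toNat := by
      simp only [List.length_take, List.length_drop]
      omega
    have hne : ((T.drop start.toNat).take ((e + 1 - start).toNat)).isEmpty = false := by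
      rw [List.isEmpty_eq_false_iff]
      intro hnil
      rw [hnil] at hlen
      simp at hlen
      omega
    rw [if_pos hle]
    rw [if_neg (show ¬ ((T.drop start.toNat).take ((e + 1 - start).toNat)).isEmpty = true from by
      simp [hne])]
    rw [hlen]
    have hm2 : PySem.Int.floordiv ((((e + 1 - start).toNat : Nat) : Int) - 1) 2 =
        ((((e + 1 - start).toNat : Nat) : Int) - 1) / 2 :=
      PySem.Int.floordiv_eq_ediv_of_pos (by omega)
    have hmeq : PySem.Int.floordiv ((((e + 1 - start).toNat : Nat) : Int) - 1) 2 =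
        PySem.Int.floordiv (start + e) 2 - start := by omega
    rw [hmeq]
    have hib : (PySem.Int.floordiv (start + e) 2 - start) <
        ((((T.drop start.toNat).take ((e + 1 - start).toNat)).length : Nat) : Int) := by
      rw [hlen]; omega
    have hx : PySem.List.pyGetD ((T.drop start.toNat).take ((e + 1 - start).toNat))
        (PySem.Int.floordiv (start + e) 2 - start) 0 =
        PySem.List.pyGetD T (PySem.Int.floordiv (start + e) 2) 0 := by
      rw [PySem.List.pyGetD_eq_getElem _ 0 (by omega) hib,
          PySem.List.pyGetD_eq_getElem T 0 (by omega) (by omega)]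
      rw [List.getElem_take, List.getElem_drop]
      congr 1
      omega
    rw [hx]
    by_cases hfound : a ≤ PySem.List.pyGetD T (PySem.Int.floordiv (start + e) 2) 0 ∧
        a ≥ PySem.List.pyGetD T (PySem.Int.floordiv (start + e) 2) 0 - d
    · rw [if_pos hfound, if_pos hfound]
      omega
    · rw [if_neg hfound, if_neg hfound]
      by_cases hlt : PySem.List.pyGetD T (PySem.Int.floordiv (start + e) 2) 0 < a
      · rw [if_pos hlt, if_pos hlt]
        have hdropeq : PySem.List.slice ((T.drop start.toNat).take ((e + 1 - start).toNat))
            (some (PySem.Int.floordiv (start + e) 2 - start + 1)) =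
            (T.drop (PySem.Int.floordiv (start + e) 2 + 1).toNat).take
              ((e + 1 - (PySem.Int.floordiv (start + e) 2 + 1)).toNat) := by
          rw [PySem.List.slice_from _ (by omega), List.drop_take, List.drop_drop]
          rw [show start.toNat + (PySem.Int.floordiv (start + e) 2 - start + 1).toNat =
              (PySem.Int.floordiv (start + e) 2 + 1).toNat from by omega]
          rw [show (e + 1 - start).toNat - (PySem.Int.floordiv (start + e) 2 - start + 1).toNat =
              (e + 1 - (PySem.Int.floordiv (start + e) 2 + 1)).toNat from by omega]
        rw [hdropeq]
        rw [IH fb (PySem.Int.floordiv (start + e) 2 + 1) e (by omega) he (by omega) (by omega)]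
        congr 1
        omega
      · rw [if_neg hlt, if_neg hlt]
        have htakeeq : PySem.List.slice ((T.drop start.toNat).take ((e + 1 - start).toNat))
            none (some (PySem.Int.floordiv (start + e) 2 - start)) =
            (T.drop start.toNat).take ((PySem.Int.floordiv (start + e) 2 - 1 + 1 - start).toNat) := by
          rw [PySem.List.slice_to _ (by omega), List.take_take]
          rw [show min (PySem.Int.floordiv (start + e) 2 - start).toNat (e + 1 - start).toNat =
              (PySem.Int.floordiv (start + e) 2 - 1 + 1 - start).toNat from by omega]
        rw [htakeeq]
        exact IH fb start (PySem.Int.floordiv (start + e) 2 - 1) hs (by omega) (by omega) (by omega)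
  · have hz : (e + 1 - start).toNat = 0 := by omega
    rw [if_neg hle, hz]
    simp

theorem zhebanchazhao_spec : Claim_equal_zhebanchazhao := by
  intro T a d _
  unfold Spec_zhebanchazhao zhebanchazhao zhebanchazhao_alt
  have h := zh_loop_eq_slice T a d (T.length + 1) (T.length + 1) 0 ((T.length : Int) - 1)
    le_rfl (by omega) (by omega) (by omega)
  simpa using h
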